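-- pv_equiv track=rewrite | github.com/VYelisieievV/Asynchronous-Backtracking | chess.py | knight_rule_attack
-- ===== SOURCE A (Python) =====
-- def knight_rule_attack(x, y, x_ref, y_ref, n):
--     """
--     Function to constraint a knight.
--     Checks if a knight figure can perform an attack move on target.
--
--     Args:
--         x (int): x coordinate of knight
--         y (int): y coordinate of knight
--         x_ref (int): x coordinate for target
--         y_ref (int): y coordinate for target
--         n (int): field size, unused
--
--     Returns:
--         bool: True if attack is possible, False otherwise
--     """
--     possible_coords = [
--         (x + 2, y + 1),
--         (x + 2, y - 1),
--         (x - 2, y + 1),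
--         (x - 2, y - 1),
--         (x, y),
--         (x + 1, y + 2),
--         (x + 1, y - 2),
--         (x - 1, y + 2),
--         (x - 1, y - 2),
--     ]
--     for x_pos, y_pos in possible_coords:
--         if x_pos == x_ref and y_pos == y_ref:
--             return True
--     return False
-- ===== SOURCE B (Python) =====
-- def knight_rule_attack(x, y, x_ref, y_ref, n):
--     dx = x_ref - x
--     dy = y_ref - y
--     return (abs(dx), abs(dy)) in {(1, 2), (2, 1)} or (dx == 0 and dy == 0)
-- ===== Notes on version B (the rewrite author's own statement) =====
-- stated objective: simpler
-- what changed: Replaced the 9-tuple enumerate-and-scan with a single closed-form arithmetic test on the displacement (abs(dx),abs(dy)) in {(1,2),(2,1)}, plus the dx==dy==0 term matching A's same-square True.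
import Mathlib
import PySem

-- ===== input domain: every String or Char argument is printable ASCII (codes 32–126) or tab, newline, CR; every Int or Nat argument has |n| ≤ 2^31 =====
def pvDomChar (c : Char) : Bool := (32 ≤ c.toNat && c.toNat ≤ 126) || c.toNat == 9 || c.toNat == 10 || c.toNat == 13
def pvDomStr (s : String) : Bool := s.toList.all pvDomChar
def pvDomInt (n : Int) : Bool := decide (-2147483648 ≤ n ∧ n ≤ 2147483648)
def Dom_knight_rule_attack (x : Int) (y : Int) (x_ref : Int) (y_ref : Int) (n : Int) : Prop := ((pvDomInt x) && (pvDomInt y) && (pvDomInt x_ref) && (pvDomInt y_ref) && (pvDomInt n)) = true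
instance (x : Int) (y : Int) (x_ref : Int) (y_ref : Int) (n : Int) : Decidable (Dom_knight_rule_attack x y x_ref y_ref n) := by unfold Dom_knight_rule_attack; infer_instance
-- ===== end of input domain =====

-- ===== PORT A =====
-- B replaces A's scan of the 9 candidate squares with one closed-form test on the displacement (simpler; same values everywhere).
-- A's for-loop over possible_coords: return True at the first matching pair, else False.
def krScan (x_ref : Int) (y_ref : Int) : List (Int × Int) → Bool
  | [] => false
  | (x_pos, y_pos) :: rest =>
      if x_pos == x_ref && y_pos == y_ref then true else krScan x_ref y_ref rest

def knight_rule_attack (x : Int) (y : Int) (x_ref : Int) (y_ref : Int) (n : Int) : Bool :=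
  let possible_coords : List (Int × Int) :=
    [(x + 2, y + 1), (x + 2, y - 1), (x - 2, y + 1), (x - 2, y - 1),
     (x, y),
     (x + 1, y + 2), (x + 1, y - 2), (x - 1, y + 2), (x - 1, y - 2)]
  krScan x_ref y_ref possible_coords

-- ===== PORT B =====
def knight_rule_attack_alt (x : Int) (y : Int) (x_ref : Int) (y_ref : Int) (n : Int) : Bool :=
  let dx := x_ref - x
  let dy := y_ref - y
  ([((1 : Int), (2 : Int)), (2, 1)].contains (|dx|, |dy|)) || (dx == 0 && dy == 0)

-- ===== PRECONDITION & SPEC =====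
def Spec_knight_rule_attack (x : Int) (y : Int) (x_ref : Int) (y_ref : Int) (n : Int) (out : Bool) : Prop := out = knight_rule_attack_alt x y x_ref y_ref n
instance (x : Int) (y : Int) (x_ref : Int) (y_ref : Int) (n : Int) (out : Bool) : Decidable (Spec_knight_rule_attack x y x_ref y_ref n out) := by unfold Spec_knight_rule_attack; infer_instance

-- ===== CLAIM (what is proved, stated in full; the proofs are below) =====
def Claim_equal_knight_rule_attack : Prop := ∀ (x : Int) (y : Int) (x_ref : Int) (y_ref : Int) (n : Int), Dom_knight_rule_attack x y x_ref y_ref n → Spec_knight_rule_attack x y x_ref y_ref n (knight_rule_attack x y x_ref y_ref n)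

-- ===== LEMMAS AND PROOFS =====

-- ===== VERDICT (by name: the statement is the Claim_ definition above) =====
theorem krScan_eq_any (xr yr : Int) (l : List (Int × Int)) :
    krScan xr yr l = l.any (fun p => p.1 == xr && p.2 == yr) := by
  induction l with
  | nil => rfl
  | cons h t ih =>
      cases h with
      | mk a b =>
          simp only [krScan, List.any_cons, ih]
          by_cases hc : (a == xr && b == yr) = true <;> simp [hc]

theorem knight_rule_attack_spec : Claim_equal_knight_rule_attack := by
  intro x y x_ref y_ref n _
  unfold Spec_knight_rule_attack knight_rule_attack knight_rule_attack_alt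
  rw [krScan_eq_any, Bool.eq_iff_iff]
  simp only [List.any_cons, List.any_nil, List.contains_cons, List.contains_nil,
    Bool.or_eq_true, Bool.and_eq_true, beq_iff_eq, Prod.mk.injEq, Bool.or_false]
  rcases abs_cases (x_ref - x) with ⟨h1, _⟩ | ⟨h1, _⟩ <;>
    rcases abs_cases (y_ref - y) with ⟨h3, _⟩ | ⟨h3, _⟩ <;>
      rw [h1, h3] <;> omega
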